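-- pv_equiv track=rewrite | github.com/VUzan-bio/GlycoML | src/glycoml/phase1/pipeline/thera_sabdab_pipeline.py | find_nglyco_sites
-- ===== SOURCE A (Python) =====
-- from typing import Dict, Iterable, List, Optional, Sequence, Tuple
--
-- def find_nglyco_sites(sequence: str) -> List[Tuple[int, str]]:
--     """Find N-X-S/T motifs (X != P). Returns 1-based positions and motif type.
--
--     Example:
--         find_nglyco_sites("ANST") -> [(2, "NXT")]
--     """
--     sequence = sequence.upper()
--     hits: List[Tuple[int, str]] = []
--     for i in range(len(sequence) - 2):
--         if sequence[i] != "N":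
--             continue
--         if sequence[i + 1] == "P":
--             continue
--         if sequence[i + 2] in {"S", "T"}:
--             motif = f"NX{sequence[i + 2]}"
--             hits.append((i + 1, motif))
--     return hits
-- ===== SOURCE B (Python) =====
-- import re
--
-- _NGLYCO_RE = re.compile(r"(?=(N[^P][ST]))")
--
-- def find_nglyco_sites(sequence):
--     """Find N-X-S/T motifs (X != P) via a single overlapping regex scan."""
--     return [(m.start() + 1, "NX" + m.group(1)[2])
--             for m in _NGLYCO_RE.finditer(sequence.upper())]
-- ===== Notes on version B (the rewrite author's own statement) =====
-- stated objective: idiomatic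
-- what changed: Replaces the manual index loop with three guard branches by a single precompiled overlapping-lookahead regex scan re.finditer(r'(?=(N[^P][ST]))') over the uppercased sequence, built as one comprehension; the scan runs in C inside the regex engine instead of per-character Python bytecode.
import Mathlib
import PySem

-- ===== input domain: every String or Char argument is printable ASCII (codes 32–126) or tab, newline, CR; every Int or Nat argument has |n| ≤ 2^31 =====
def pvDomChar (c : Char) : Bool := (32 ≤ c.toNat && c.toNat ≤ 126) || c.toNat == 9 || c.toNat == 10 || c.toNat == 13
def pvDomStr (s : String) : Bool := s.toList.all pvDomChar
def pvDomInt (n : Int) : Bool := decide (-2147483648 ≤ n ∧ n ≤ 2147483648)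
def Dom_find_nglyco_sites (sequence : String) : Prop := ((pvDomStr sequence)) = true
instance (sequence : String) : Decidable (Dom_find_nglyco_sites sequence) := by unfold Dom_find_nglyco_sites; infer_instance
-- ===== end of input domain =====

-- B replaces A's index loop with an overlapping regex window scan; objective: idiomatic, same value everywhere.

-- ===== PORT A =====
-- literal transliteration: uppercase, loop i in range(len-2), three guards, append (i+1, "NX"+s[i+2])
def find_nglyco_sites (sequence : String) : List (Int × String) :=
  let s := PySem.Str.upper sequence
  (PySem.List.pyRange 0 ((PySem.Str.len s) - 2) 1).foldl (fun hits i =>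
    match PySem.Str.pyGet? s i with
    | none => hits   -- unreachable: i in range(len-2)
    | some a =>
      if a ≠ 'N' then hits
      else
        match PySem.Str.pyGet? s (i + 1) with
        | none => hits
        | some b =>
          if b = 'P' then hits
          else
            match PySem.Str.pyGet? s (i + 2) with
            | none => hits
            | some c =>
              if c = 'S' ∨ c = 'T' then hits ++ [(i + 1, String.ofList ['N', 'X', c])]
              else hits) []

-- ===== PORT B =====
-- the regex engine's scan: try the lookahead (?=(N[^P][ST])) at each position, advance one char
def pvRegexScan : List Char → Int → List (Int × String)
  | a :: b :: c :: rest, pos =>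
      if a = 'N' ∧ b ≠ 'P' ∧ (c = 'S' ∨ c = 'T') then
        (pos + 1, String.ofList ['N', 'X', c]) :: pvRegexScan (b :: c :: rest) (pos + 1)
      else pvRegexScan (b :: c :: rest) (pos + 1)
  | _, _ => []

def find_nglyco_sites_alt (sequence : String) : List (Int × String) :=
  pvRegexScan (PySem.Str.upper sequence).toList 0

-- ===== PRECONDITION & SPEC =====
def Spec_find_nglyco_sites (sequence : String) (out : List (Int × String)) : Prop := out = find_nglyco_sites_alt sequence
instance (sequence : String) (out : List (Int × String)) : Decidable (Spec_find_nglyco_sites sequence out) := by unfold Spec_find_nglyco_sites; infer_instance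

-- ===== CLAIM (what is proved, stated in full; the proofs are below) =====
def Claim_equal_find_nglyco_sites : Prop := ∀ (sequence : String), Dom_find_nglyco_sites sequence → Spec_find_nglyco_sites sequence (find_nglyco_sites sequence)

-- ===== LEMMAS AND PROOFS =====

-- the motif hit produced at index k (1-based position offset pos), as both programs see it
def pvHit (cs : List Char) (k : Nat) (pos : Int) : List (Int × String) :=
  match cs[k]?, cs[k+1]?, cs[k+2]? with
  | some a, some b, some c =>
      if a = 'N' ∧ b ≠ 'P' ∧ (c = 'S' ∨ c = 'T') then [(pos + (k : Int) + 1, String.ofList ['N', 'X', c])]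
      else []
  | _, _, _ => []

lemma pvHit_cons (a : Char) (t : List Char) (k : Nat) (pos : Int) :
    pvHit (a :: t) (k + 1) pos = pvHit t k (pos + 1) := by
  simp only [pvHit, List.getElem?_cons_succ]
  push_cast
  ring_nf

lemma pvRegexScan_eq (cs : List Char) (pos : Int) :
    pvRegexScan cs pos = (List.range (cs.length - 2)).flatMap (fun k => pvHit cs k pos) := by
  induction cs generalizing pos with
  | nil => simp [pvRegexScan]
  | cons a t ih =>
    match t with
    | [] => simp [pvRegexScan]
    | [b] => simp [pvRegexScan]
    | b :: c :: rest =>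
      have hlen : (a :: b :: c :: rest).length - 2 = ((b :: c :: rest).length - 2) + 1 := by
        simp
      rw [hlen, List.range_succ_eq_map, List.flatMap_cons, List.flatMap_map]
      have htail : ((List.range ((b :: c :: rest).length - 2)).flatMap
          (fun k => pvHit (a :: b :: c :: rest) (k + 1) pos))
          = pvRegexScan (b :: c :: rest) (pos + 1) := by
        rw [ih]
        refine List.flatMap_congr ?_
        intro k _
        exact pvHit_cons a _ k pos
      show pvRegexScan (a :: b :: c :: rest) pos = _
      simp only [Nat.succ_eq_add_one]
      rw [htail]
      simp only [pvRegexScan]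
      by_cases h : a = 'N' ∧ b ≠ 'P' ∧ (c = 'S' ∨ c = 'T')
      · simp [h, pvHit]
      · simp [h, pvHit]

-- A's loop body at index 0 + k equals the window hit pvHit
lemma pvStepA_eq (u : String) (acc : List (Int × String)) (k : Nat) :
    (match PySem.Str.pyGet? u (0 + (k : Int)) with
     | none => acc
     | some a =>
       if a ≠ 'N' then acc
       else
         match PySem.Str.pyGet? u (0 + (k : Int) + 1) with
         | none => acc
         | some b =>
           if b = 'P' then acc
           else
             match PySem.Str.pyGet? u (0 + (k : Int) + 2) with
             | none => acc
             | some c =>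
               if c = 'S' ∨ c = 'T' then acc ++ [(0 + (k : Int) + 1, String.ofList ['N', 'X', c])]
               else acc)
    = acc ++ pvHit u.toList k 0 := by
  have e0 : (0 : Int) + (k : Int) = ((k : Nat) : Int) := by ring
  have e1 : (k : Int) + 1 = (((k + 1 : Nat)) : Int) := by push_cast; ring
  have e2 : (k : Int) + 2 = (((k + 2 : Nat)) : Int) := by push_cast; ring
  rw [e0, e1, e2, PySem.Str.pyGet?_natCast, PySem.Str.pyGet?_natCast, PySem.Str.pyGet?_natCast]
  unfold pvHit
  rcases h1 : u.toList[k]? with _ | a <;>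
    rcases h2 : u.toList[k+1]? with _ | b <;>
    rcases h3 : u.toList[k+2]? with _ | c <;>
    simp only []
  all_goals try simp
  by_cases hA : a = 'N' <;> by_cases hB : b = 'P' <;> by_cases hC : c = 'S' ∨ c = 'T' <;>
    simp [hA, hB, hC]

-- fold with an 'append one block per element' body is the flatMap of the blocks
lemma pvFoldFlat {α : Type} (f : Nat → List α) (G : List α → Nat → List α)
    (hG : ∀ acc k, G acc k = acc ++ f k) :
    ∀ (l : List Nat) (acc : List α), l.foldl G acc = acc ++ l.flatMap f := by
  intro l
  induction l with
  | nil => intro acc; simp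
  | cons k t ih => intro acc; rw [List.foldl_cons, ih, hG, List.flatMap_cons, List.append_assoc]

-- ===== VERDICT (by name: the statement is the Claim_ definition above) =====
theorem find_nglyco_sites_spec : Claim_equal_find_nglyco_sites := by
  intro sequence _
  unfold Spec_find_nglyco_sites find_nglyco_sites find_nglyco_sites_alt
  rw [pvRegexScan_eq]
  simp only [PySem.Str.len_eq, PySem.List.pyRange_one, List.foldl_map]
  have hm : (((PySem.Str.upper sequence).toList.length : Int) - 2 - 0).toNat
      = (PySem.Str.upper sequence).toList.length - 2 := by omega
  rw [hm]
  rw [pvFoldFlat (fun k => pvHit (PySem.Str.upper sequence).toList k 0) _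
      (fun acc k => pvStepA_eq (PySem.Str.upper sequence) acc k)]
  simp
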